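-- pv_equiv track=rewrite | github.com/SquirtlesAlgorithmStudy/SquirtlesAlgorithmStudy-Hard | 민서/공정컨설턴트호석.py | able
-- ===== SOURCE A (Python) =====
-- import heapq as hq
--
-- def able(arr, K, X):
--     que = [0] * K
--     for n in arr:
--         tmp = hq.heappop(que)
--         if tmp + n > X:
--             return False
--         hq.heappush(que, tmp + n)
--     return True
-- ===== SOURCE B (Python) =====
-- def able(arr, K, X):
--     # loads kept sorted ascending: the smallest load is always loads[0]
--     loads = [0] * K
--     for n in arr:
--         m = loads.pop(0)
--         if m + n > X:
--             return False
--         # ordered insert of m + n (after equal elements)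
--         i = 0
--         while i < len(loads) and not (m + n < loads[i]):
--             i += 1
--         loads.insert(i, m + n)
--     return True
-- ===== Notes on version B (the rewrite author's own statement) =====
-- stated objective: alternative
-- what changed: Replaces the heapq priority queue by an explicitly sorted load list: the smallest load is popped from the front and the updated load is re-inserted at its ordered position by a linear insertion scan; no heapq.
import Mathlib
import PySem

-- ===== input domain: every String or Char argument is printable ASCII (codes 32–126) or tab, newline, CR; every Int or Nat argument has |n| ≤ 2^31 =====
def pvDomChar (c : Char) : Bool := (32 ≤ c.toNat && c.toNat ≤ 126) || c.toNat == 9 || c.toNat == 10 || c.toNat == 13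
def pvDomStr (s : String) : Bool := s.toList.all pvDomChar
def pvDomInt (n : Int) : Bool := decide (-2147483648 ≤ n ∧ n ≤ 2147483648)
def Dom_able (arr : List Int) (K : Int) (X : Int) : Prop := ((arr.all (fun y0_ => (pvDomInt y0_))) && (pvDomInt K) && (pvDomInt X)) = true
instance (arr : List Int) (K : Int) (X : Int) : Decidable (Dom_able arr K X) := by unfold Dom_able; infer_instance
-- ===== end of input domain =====

-- B replaces A's heapq priority queue by an explicitly sorted load list: pop the
-- head (smallest load) and re-insert the updated load by a linear ordered insertion
-- (objective: alternative, similar cost).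


-- ===== PORT A =====
-- heapq is ported by its library contract: heappop returns the heap's minimum and
-- removes it (PySem.List.min? + List.erase on the first occurrence), heappush appends;
-- this is exact in every value A observes.  heappop on an empty heap raises IndexError
-- (the none branch), excluded by Pre_able.
def ableGoA (X : Int) : List Int → List Int → Bool
  | [], _ => true
  | n :: rest, que =>
    match PySem.List.min? que (fun y => y) with
    | none => false
    | some tmp =>
      if tmp + n > X then false
      else ableGoA X rest ((que.erase tmp) ++ [tmp + n])

def able (arr : List Int) (K : Int) (X : Int) : Bool :=
  ableGoA X arr (List.replicate K.toNat 0)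

-- ===== PORT B =====
-- Source B's while-loop insertion: walk past every element not greater than v, insert v there.
def insortB (v : Int) : List Int → List Int
  | [] => [v]
  | x :: rest => if v < x then v :: x :: rest else x :: insortB v rest

-- loads.pop(0) on an empty list raises IndexError (the [] branch), excluded by Pre_able.
def ableGoB (X : Int) : List Int → List Int → Bool
  | [], _ => true
  | _ :: _, [] => false
  | n :: rest, m :: tl =>
    if m + n > X then false
    else ableGoB X rest (insortB (m + n) tl)

def able_alt (arr : List Int) (K : Int) (X : Int) : Bool :=
  ableGoB X arr (List.replicate K.toNat 0)

-- ===== PRECONDITION & SPEC =====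
-- Pre_ excludes only the inputs on which A raises: K ≤ 0 with a non-empty arr
-- (heappop on an empty heap raises IndexError; B's loads.pop(0) raises IndexError there too).
def Pre_able (arr : List Int) (K : Int) (X : Int) : Prop := arr = [] ∨ 1 ≤ K
instance (arr : List Int) (K : Int) (X : Int) : Decidable (Pre_able arr K X) := by unfold Pre_able; infer_instance
def pvWitness_able : List Int × Int × Int := ([3, 1, 4], 2, 5)

def Spec_able (arr : List Int) (K : Int) (X : Int) (out : Bool) : Prop := out = able_alt arr K X
instance (arr : List Int) (K : Int) (X : Int) (out : Bool) : Decidable (Spec_able arr K X out) := by unfold Spec_able; infer_instance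

-- ===== CLAIM (what is proved, stated in full; the proofs are below) =====
def Claim_equal_able : Prop := ∀ (arr : List Int) (K : Int) (X : Int), Dom_able arr K X → Pre_able arr K X → Spec_able arr K X (able arr K X)

-- ===== LEMMAS AND PROOFS =====

-- equal minima under permutation
theorem min?_eq_of_perm {q l : List Int} (h : q.Perm l) :
    PySem.List.min? q (fun y => y) = PySem.List.min? l (fun y => y) := by
  cases hq : PySem.List.min? q (fun y => y) with
  | none =>
    rw [PySem.List.min?_eq_none_iff] at hq
    subst hq
    have hl : l = [] := h.symm.eq_nil
    simp [hl, PySem.List.min?]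
  | some m =>
    cases hl : PySem.List.min? l (fun y => y) with
    | none =>
      rw [PySem.List.min?_eq_none_iff] at hl
      subst hl
      have hq' : q = [] := h.eq_nil
      subst hq'
      simp [PySem.List.min?] at hq
    | some m' =>
      have hmq : m ∈ q := PySem.List.min?_mem hq
      have hml : m' ∈ l := PySem.List.min?_mem hl
      have h1 : m' ≤ m := PySem.List.min?_isMin hl m (h.mem_iff.mp hmq)
      have h2 : m ≤ m' := PySem.List.min?_isMin hq m' (h.mem_iff.mpr hml)
      have : m = m' := le_antisymm h2 h1
      simp [this]

-- on a sorted nonempty list the minimum is the head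
theorem min?_sorted_head {m : Int} {tl : List Int}
    (hs : (m :: tl).Pairwise (· ≤ ·)) :
    PySem.List.min? (m :: tl) (fun y => y) = some m := by
  have hne : PySem.List.min? (m :: tl) (fun y => y) ≠ none := by
    simp [PySem.List.min?_eq_none_iff]
  obtain ⟨m', hq⟩ := Option.ne_none_iff_exists'.mp hne
  have hmem : m' ∈ m :: tl := PySem.List.min?_mem hq
  have h1 : m' ≤ m := PySem.List.min?_isMin hq m (by simp)
  have h2 : m ≤ m' := by
    rcases List.mem_cons.mp hmem with h | h
    · exact h.symm.le
    · exact (List.pairwise_cons.mp hs).1 m' h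
  rw [hq, le_antisymm h1 h2]

theorem insortB_perm (v : Int) (l : List Int) : (insortB v l).Perm (v :: l) := by
  induction l with
  | nil => simp [insortB]
  | cons x rest ih =>
    simp only [insortB]
    split_ifs
    · exact List.Perm.refl _
    · exact (List.Perm.cons x ih).trans (List.Perm.swap v x rest)

theorem insortB_sorted {v : Int} {l : List Int} (hs : l.Pairwise (· ≤ ·)) :
    (insortB v l).Pairwise (· ≤ ·) := by
  induction l with
  | nil => simp [insortB]
  | cons x rest ih =>
    obtain ⟨hx, hrest⟩ := List.pairwise_cons.mp hs
    simp only [insortB]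
    split_ifs with hv
    · refine List.pairwise_cons.mpr ⟨?_, hs⟩
      intro y hy
      rcases List.mem_cons.mp hy with h | h
      · exact h ▸ hv.le
      · exact hv.le.trans (hx y h)
    · refine List.pairwise_cons.mpr ⟨?_, ih hrest⟩
      intro y hy
      rcases List.mem_cons.mp ((insortB_perm v rest).mem_iff.mp hy) with h | h
      · exact h ▸ not_lt.mp hv
      · exact hx y h

-- the initial all-zero load list is sorted
theorem pairwise_replicate_zero (k : Nat) :
    (List.replicate k (0 : Int)).Pairwise (· ≤ ·) := by
  induction k with
  | zero => simp
  | succ k ih =>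
    refine List.pairwise_cons.mpr ⟨?_, ih⟩
    intro y hy
    simp_all [List.eq_of_mem_replicate hy]

-- the two loops agree when B's state is a sorted permutation of A's state
theorem go_eq (X : Int) (arr : List Int) :
    ∀ (q l : List Int), q.Perm l → l.Pairwise (· ≤ ·) →
      ableGoA X arr q = ableGoB X arr l := by
  induction arr with
  | nil => intro q l _ _; simp [ableGoA, ableGoB]
  | cons n rest ih =>
    intro q l h hs
    cases l with
    | nil =>
      have hq : q = [] := h.eq_nil
      subst hq
      simp [ableGoA, ableGoB, PySem.List.min?]
    | cons m tl =>
      simp only [ableGoA, ableGoB]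
      rw [min?_eq_of_perm h, min?_sorted_head hs]
      by_cases hc : m + n > X
      · simp [hc]
      · simp only [if_neg hc]
        apply ih
        · have htl : (q.erase m).Perm tl := by
            have := h.erase m
            simpa [List.erase_cons_head] using this
          exact (htl.append (List.Perm.refl [m + n])).trans
            ((List.perm_append_singleton (m + n) tl).trans (insortB_perm (m + n) tl).symm)
        · exact insortB_sorted (List.pairwise_cons.mp hs).2

-- ===== VERDICT (by name: the statement is the Claim_ definition above) =====
theorem able_spec : Claim_equal_able := by
  intro arr K X _ _
  unfold Spec_able able able_alt
  exact go_eq X arr _ _ (List.Perm.refl _) (pairwise_replicate_zero K.toNat)
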